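-- pv_equiv track=rewrite | github.com/Lukzegl/Podstawy-sztucznej-inteligencji | main.py | parse_single_hand
-- ===== SOURCE A (Python) =====
-- def parse_single_hand(hand_str):
--
--     if hand_str and hand_str[0].isdigit():
--         hand_str = hand_str[1:]
--
--     suits = {'S': 'Spades', 'H': 'Hearts', 'D': 'Diamonds', 'C': 'Clubs'}
--     hand_dict = {suit: [] for suit in suits.values()}
--
--     current_suit = None
--     for char in hand_str:
--         if char in suits:
--             current_suit = suits[char]
--         elif current_suit:
--             hand_dict[current_suit].append(char)
--
--     return hand_dict
-- ===== SOURCE B (Python) =====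
-- def _groups(s):
--     """Split s into (suit_letter, following_run_of_non_suit_chars) segments."""
--     groups = []
--     i = 0
--     n = len(s)
--     while i < n:
--         if s[i] in 'SHDC':
--             j = i + 1
--             while j < n and s[j] not in 'SHDC':
--                 j += 1
--             groups.append((s[i], s[i + 1:j]))
--             i = j
--         else:
--             i += 1
--     return groups
--
--
-- def parse_single_hand(hand_str):
--     if hand_str[:1].isdigit():
--         hand_str = hand_str[1:]
--     names = {'S': 'Spades', 'H': 'Hearts', 'D': 'Diamonds', 'C': 'Clubs'}
--     result = {name: [] for name in names.values()}
--     for suit, run in _groups(hand_str):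
--         result[names[suit]].extend(run)
--     return result
-- ===== Notes on version B (the rewrite author's own statement) =====
-- stated objective: alternative
-- what changed: Replaces the per-character state machine (current_suit carried across the loop, one append per card) with a segment scanner that first splits the string into (suit letter, run of following cards) groups and then extends each suit's list with a whole run at a time.
import Mathlib
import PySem

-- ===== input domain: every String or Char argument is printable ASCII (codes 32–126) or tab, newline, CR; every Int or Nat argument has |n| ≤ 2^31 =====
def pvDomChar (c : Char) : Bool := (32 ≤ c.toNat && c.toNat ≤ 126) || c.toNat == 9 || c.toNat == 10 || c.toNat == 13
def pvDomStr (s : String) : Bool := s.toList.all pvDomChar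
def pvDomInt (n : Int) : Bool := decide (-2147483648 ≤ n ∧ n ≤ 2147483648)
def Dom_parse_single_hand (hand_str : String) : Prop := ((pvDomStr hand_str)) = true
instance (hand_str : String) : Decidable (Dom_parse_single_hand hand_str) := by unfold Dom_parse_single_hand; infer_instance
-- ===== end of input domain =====

-- B replaces A's per-character current_suit state machine by a run-splitting scan
-- that extends each suit's list with a whole run of cards at a time (objective: alternative).

-- ===== PORT A =====
-- A's per-character loop: current_suit state + one append per card.
def pshA_suit? (c : Char) : Option String :=
  if c = 'S' then some "Spades"
  else if c = 'H' then some "Hearts"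
  else if c = 'D' then some "Diamonds"
  else if c = 'C' then some "Clubs"
  else none

-- hand_dict[current_suit].append(char): the key is always present in the dict
def pshA_app (d : List (String × List String)) (nm : String) (c : Char) :
    List (String × List String) :=
  d.map (fun p => if p.1 = nm then (p.1, p.2 ++ [String.ofList [c]]) else p)

def pshA_step (st : Option String × List (String × List String)) (c : Char) :
    Option String × List (String × List String) :=
  match pshA_suit? c with
  | some nm => (some nm, st.2)
  | none =>
    match st.1 with  -- 'elif current_suit:' — the four suit names are all truthy
    | some nm => (some nm, pshA_app st.2 nm c)
    | none => st

def parse_single_hand (hand_str : String) : List (String × List String) :=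
  -- if hand_str and hand_str[0].isdigit(): hand_str = hand_str[1:]
  let cs : List Char :=
    match hand_str.toList with
    | [] => []
    | c :: rest => if PySem.Chars.isdigit c then rest else c :: rest
  (cs.foldl pshA_step
    (none, [("Spades", []), ("Hearts", []), ("Diamonds", []), ("Clubs", [])])).2

-- ===== PORT B =====
def pshB_isSuit (c : Char) : Bool := c == 'S' || c == 'H' || c == 'D' || c == 'C'

def pshB_name (c : Char) : String :=
  if c == 'S' then "Spades" else if c == 'H' then "Hearts"
  else if c == 'D' then "Diamonds" else "Clubs"

-- _groups: the outer while skips non-suit chars; at a suit letter the inner while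
-- collects the run of following non-suit chars (takeWhile/dropWhile) and recurses.
def pshB_groups : List Char → List (Char × List Char)
  | [] => []
  | c :: rest =>
    if pshB_isSuit c then
      (c, rest.takeWhile (fun x => !pshB_isSuit x))
        :: pshB_groups (rest.dropWhile (fun x => !pshB_isSuit x))
    else pshB_groups rest
termination_by l => l.length
decreasing_by
  · exact Nat.lt_succ_of_le (rest.length_dropWhile_le _)
  · simp

-- result[names[suit]].extend(run)
def pshB_extend (d : List (String × List String)) (nm : String) (run : List Char) :
    List (String × List String) :=
  d.map (fun p => if p.1 = nm then (p.1, p.2 ++ run.map (fun c => String.ofList [c])) else p)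

def pshB_step (d : List (String × List String)) (g : Char × List Char) :
    List (String × List String) :=
  pshB_extend d (pshB_name g.1) g.2

def parse_single_hand_alt (hand_str : String) : List (String × List String) :=
  -- if hand_str[:1].isdigit(): hand_str = hand_str[1:]
  let cs0 := hand_str.toList
  let cs := if PySem.Chars.strIsdigit (cs0.take 1) then cs0.drop 1 else cs0
  (pshB_groups cs).foldl pshB_step
    [("Spades", []), ("Hearts", []), ("Diamonds", []), ("Clubs", [])]

-- ===== PRECONDITION & SPEC =====
def Spec_parse_single_hand (hand_str : String) (out : List (String × List String)) : Prop := out = parse_single_hand_alt hand_str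
instance (hand_str : String) (out : List (String × List String)) : Decidable (Spec_parse_single_hand hand_str out) := by unfold Spec_parse_single_hand; infer_instance

-- ===== CLAIM (what is proved, stated in full; the proofs are below) =====
def Claim_equal_parse_single_hand : Prop := ∀ (hand_str : String), Dom_parse_single_hand hand_str → Spec_parse_single_hand hand_str (parse_single_hand hand_str)

-- ===== LEMMAS AND PROOFS =====

theorem pshB_groups_nonsuit {c : Char} (rest : List Char) (h : pshB_isSuit c = false) :
    pshB_groups (c :: rest) = pshB_groups rest := by
  rw [pshB_groups]; simp [h]

theorem pshB_groups_suit {c : Char} (rest : List Char) (h : pshB_isSuit c = true) :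
    pshB_groups (c :: rest) =
      (c, rest.takeWhile (fun x => !pshB_isSuit x))
        :: pshB_groups (rest.dropWhile (fun x => !pshB_isSuit x)) := by
  rw [pshB_groups]; simp [h]

theorem pshA_suit?_of_false {c : Char} (h : pshB_isSuit c = false) : pshA_suit? c = none := by
  simp [pshB_isSuit] at h
  obtain ⟨⟨⟨h1, h2⟩, h3⟩, h4⟩ := h
  simp [pshA_suit?, h1, h2, h3, h4]

theorem pshA_suit?_of_true {c : Char} (h : pshB_isSuit c = true) :
    pshA_suit? c = some (pshB_name c) := by
  simp [pshB_isSuit] at h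
  rcases h with ((h | h) | h) | h <;> subst h <;> decide

theorem pshB_extend_nil (d : List (String × List String)) (nm : String) :
    pshB_extend d nm [] = d := by
  simp [pshB_extend]

theorem pshB_extend_extend (d : List (String × List String)) (nm : String)
    (r1 r2 : List Char) :
    pshB_extend (pshB_extend d nm r1) nm r2 = pshB_extend d nm (r1 ++ r2) := by
  simp only [pshB_extend, List.map_map]
  congr 1
  funext p
  by_cases h : p.1 = nm <;> simp [h, Function.comp]

theorem pshA_app_eq_extend (d : List (String × List String)) (nm : String) (c : Char) :
    pshA_app d nm c = pshB_extend d nm [c] := rfl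

theorem foldA_some (cs : List Char) :
    ∀ (nm : String) (d : List (String × List String)),
      (cs.foldl pshA_step (some nm, d)).2 =
        (pshB_groups (cs.dropWhile (fun x => !pshB_isSuit x))).foldl pshB_step
          (pshB_extend d nm (cs.takeWhile (fun x => !pshB_isSuit x))) := by
  induction cs with
  | nil => intro nm d; simp [pshB_groups, pshB_extend_nil]
  | cons c rest ih =>
    intro nm d
    by_cases h : pshB_isSuit c = true
    · simp only [List.foldl_cons, pshA_step, pshA_suit?_of_true h]
      rw [ih (pshB_name c) d]
      simp [List.takeWhile, List.dropWhile, h, pshB_groups_suit rest h,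
        pshB_extend_nil, pshB_step]
    · replace h : pshB_isSuit c = false := by simpa using h
      simp only [List.foldl_cons, pshA_step, pshA_suit?_of_false h]
      rw [ih nm (pshA_app d nm c)]
      simp [List.takeWhile, List.dropWhile, h, pshA_app_eq_extend,
        pshB_extend_extend]

theorem foldA_none (cs : List Char) :
    ∀ (d : List (String × List String)),
      (cs.foldl pshA_step (none, d)).2 = (pshB_groups cs).foldl pshB_step d := by
  induction cs with
  | nil => intro d; simp [pshB_groups]
  | cons c rest ih =>
    intro d
    by_cases h : pshB_isSuit c = true
    · simp only [List.foldl_cons, pshA_step, pshA_suit?_of_true h]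
      rw [foldA_some rest (pshB_name c) d, pshB_groups_suit rest h]
      simp [pshB_step]
    · replace h : pshB_isSuit c = false := by simpa using h
      simp only [List.foldl_cons, pshA_step, pshA_suit?_of_false h]
      rw [ih d, pshB_groups_nonsuit rest h]

theorem strip_eq (cs : List Char) :
    (match cs with
      | [] => ([] : List Char)
      | c :: rest => if PySem.Chars.isdigit c then rest else c :: rest) =
    (if PySem.Chars.strIsdigit (cs.take 1) then cs.drop 1 else cs) := by
  cases cs with
  | nil => simp [PySem.Chars.strIsdigit]
  | cons c rest =>
    by_cases h : PySem.Chars.isdigit c = true <;>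
      simp [PySem.Chars.strIsdigit, h]

-- ===== VERDICT (by name: the statement is the Claim_ definition above) =====
theorem main_list (cs0 : List Char) :
    ((match cs0 with
        | [] => ([] : List Char)
        | c :: rest => if PySem.Chars.isdigit c then rest else c :: rest).foldl pshA_step
      (none, [("Spades", []), ("Hearts", []), ("Diamonds", []), ("Clubs", [])])).2 =
    (pshB_groups (if PySem.Chars.strIsdigit (cs0.take 1) then cs0.drop 1 else cs0)).foldl
      pshB_step [("Spades", []), ("Hearts", []), ("Diamonds", []), ("Clubs", [])] := by
  rw [← strip_eq cs0]
  exact foldA_none _ _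

theorem parse_single_hand_spec : Claim_equal_parse_single_hand := by
  intro hand_str _
  show parse_single_hand hand_str = parse_single_hand_alt hand_str
  exact main_list hand_str.toList
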